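-- pv_equiv track=rewrite | github.com/JoseCutileiro/Erasmus-23-24 | PFP/PFP/testar/segreduce.py | local_reduction
-- ===== SOURCE A (Python) =====
-- def op(v1, f1, v2, f2):
--     # Define the operation ⊕′
--     result_value = v1 if not f2 else v1 + v2
--     result_flag = f1 or f2
--     return (result_value, result_flag)
--
-- def local_reduction(scattered_data):
--     result = []
--     for segment_data in scattered_data:
--         segment_result_value = 0
--         segment_result_flag = False
--         for value, flag in segment_data:
--             segment_result_value, segment_result_flag = op(segment_result_value, segment_result_flag, value, flag)
--         result.append((segment_result_value, segment_result_flag))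
--     return result
-- ===== SOURCE B (Python) =====
-- def local_reduction(scattered_data):
--     return [(sum(v for v, f in segment if f),
--              any(f for _, f in segment))
--             for segment in scattered_data]
-- ===== Notes on version B (the rewrite author's own statement) =====
-- stated objective: simpler
-- what changed: Replaced the fused op-accumulator fold with two independent per-segment aggregates: a sum of flagged values and an any() over the flags (flags are Bool here, so any() equals the or-chain).
import Mathlib
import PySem

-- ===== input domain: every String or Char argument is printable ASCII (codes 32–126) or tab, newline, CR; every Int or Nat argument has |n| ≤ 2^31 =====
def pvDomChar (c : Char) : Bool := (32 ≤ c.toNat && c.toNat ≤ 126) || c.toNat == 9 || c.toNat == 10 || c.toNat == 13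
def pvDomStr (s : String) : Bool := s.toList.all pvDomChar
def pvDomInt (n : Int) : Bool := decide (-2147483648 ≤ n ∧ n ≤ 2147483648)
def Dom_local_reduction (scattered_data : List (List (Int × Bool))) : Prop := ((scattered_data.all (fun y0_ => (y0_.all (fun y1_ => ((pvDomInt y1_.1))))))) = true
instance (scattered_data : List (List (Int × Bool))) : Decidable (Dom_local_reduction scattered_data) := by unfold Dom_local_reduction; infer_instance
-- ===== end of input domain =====

-- B replaces the fused op-fold with two independent per-segment aggregates (sum of flagged values, any flag); same cost, simpler.

-- ===== PORT A =====
def op (v1 : Int) (f1 : Bool) (v2 : Int) (f2 : Bool) : Int × Bool :=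
  (if !f2 then v1 else v1 + v2, f1 || f2)

def local_reduction (scattered_data : List (List (Int × Bool))) : List (Int × Bool) :=
  scattered_data.foldl (fun result segment_data =>
    let seg := segment_data.foldl (fun (acc : Int × Bool) (p : Int × Bool) =>
      op acc.1 acc.2 p.1 p.2) (0, false)
    result ++ [seg]) []

-- ===== PORT B =====
def local_reduction_alt (scattered_data : List (List (Int × Bool))) : List (Int × Bool) :=
  scattered_data.map (fun segment =>
    ((segment.filter (fun p => p.2)).foldl (fun a p => a + p.1) 0,
     segment.any (fun p => p.2)))

-- ===== PRECONDITION & SPEC =====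
def Spec_local_reduction (scattered_data : List (List (Int × Bool))) (out : List (Int × Bool)) : Prop := out = local_reduction_alt scattered_data
instance (scattered_data : List (List (Int × Bool))) (out : List (Int × Bool)) : Decidable (Spec_local_reduction scattered_data out) := by unfold Spec_local_reduction; infer_instance

-- ===== CLAIM (what is proved, stated in full; the proofs are below) =====
def Claim_equal_local_reduction : Prop := ∀ (scattered_data : List (List (Int × Bool))), Dom_local_reduction scattered_data → Spec_local_reduction scattered_data (local_reduction scattered_data)

-- ===== LEMMAS AND PROOFS =====

theorem seg_fold_eq (seg : List (Int × Bool)) (v : Int) (f : Bool) :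
    seg.foldl (fun (acc : Int × Bool) (p : Int × Bool) => op acc.1 acc.2 p.1 p.2) (v, f)
      = ((seg.filter (fun p => p.2)).foldl (fun a p => a + p.1) v, f || seg.any (fun p => p.2)) := by
  induction seg generalizing v f with
  | nil => simp
  | cons hd tl ih =>
    obtain ⟨hv, hf⟩ := hd
    simp only [List.foldl_cons]
    cases hf
    · rw [show op v f hv false = (v, f) from by simp [op], ih]
      simp
    · rw [show op v f hv true = (v + hv, true) from by simp [op], ih]
      simp

theorem foldl_append_map {α β : Type} (g : α → β) (xs : List α) (acc : List β) :
    xs.foldl (fun r x => r ++ [g x]) acc = acc ++ xs.map g := by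
  induction xs generalizing acc with
  | nil => simp
  | cons hd tl ih => simp [ih]

theorem local_reduction_spec : Claim_equal_local_reduction := by
  intro scattered_data _
  unfold Spec_local_reduction local_reduction local_reduction_alt
  rw [foldl_append_map]
  simp [seg_fold_eq]
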